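-- pv_equiv track=rewrite | github.com/pypi-data/pypi-mirror-283 | packages/karma-game-library/karma_game_library-1.0.1-py3-none-any.whl/karma_game_library/templates/payment/payment.py | bid_difference_to_society
-- ===== SOURCE A (Python) =====
-- from typing import List
--
-- def bid_difference_to_society(actions: List[int], outcomes: List[int]) -> List[int]:
--     """
--     The winner pays the difference of highest and second highest bid to the
--     society (Karma overflow).
--     """
--     payments = []
--     highest_bid = max(actions)
--     second_highest_bid = sorted(set(actions))[-2]
--     bid_difference = highest_bid - second_highest_bid
--     for n in range(0, len(actions)):
--         if(outcomes[n]==1):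
--             payments.append(-bid_difference)
--         else:
--             payments.append(0)
--     overflow = +bid_difference
--     return payments, overflow
-- ===== SOURCE B (Python) =====
-- from typing import List
--
-- def bid_difference_to_society(actions: List[int], outcomes: List[int]) -> List[int]:
--     """
--     Winner pays the gap between the highest and second-highest distinct bid.
--     Single linear pass tracking the two largest distinct bid values instead of
--     building a set and sorting it.
--     """
--     hi = None
--     lo = None
--     for a in actions:
--         if hi is None or a > hi:
--             hi, lo = a, hi
--         elif a != hi and (lo is None or a > lo):
--             lo = a
--     diff = hi - lo
--     payments = [-diff if outcomes[n] == 1 else 0 for n in range(len(actions))]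
--     return payments, diff
-- ===== Notes on version B (the rewrite author's own statement) =====
-- stated objective: faster
-- what changed: Replaces max() plus building a set and sorting it to get the second-highest distinct bid with a single linear scan that tracks the two largest distinct bid values.
import Mathlib
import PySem

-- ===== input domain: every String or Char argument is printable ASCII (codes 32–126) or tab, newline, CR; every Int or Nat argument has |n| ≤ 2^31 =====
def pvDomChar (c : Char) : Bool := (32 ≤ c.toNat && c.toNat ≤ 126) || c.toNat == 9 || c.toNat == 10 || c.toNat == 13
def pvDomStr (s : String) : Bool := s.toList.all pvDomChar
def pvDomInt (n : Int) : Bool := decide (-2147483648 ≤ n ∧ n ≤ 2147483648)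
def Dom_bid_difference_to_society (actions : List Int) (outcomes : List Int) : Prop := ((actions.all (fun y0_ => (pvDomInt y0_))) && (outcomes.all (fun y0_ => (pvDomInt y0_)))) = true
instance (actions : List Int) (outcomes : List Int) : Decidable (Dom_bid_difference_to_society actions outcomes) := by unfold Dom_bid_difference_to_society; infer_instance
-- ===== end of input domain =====

-- B replaces A's set-build-and-sort (O(n log n)) for the second-highest distinct bid
-- with a single linear pass tracking the two largest distinct bid values (O(n)).


-- ===== PORT A =====
def bid_difference_to_society (actions : List Int) (outcomes : List Int) : List Int × Int :=
  let highest_bid := (PySem.List.max? actions (fun x => x)).getD 0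
  let second_highest_bid :=
    (PySem.List.pyGet? (PySem.List.sorted (PySem.Set.ofList actions) (fun x => x) false) (-2)).getD 0
  let bid_difference := highest_bid - second_highest_bid
  let payments := (PySem.List.pyRange 0 (actions.length : Int) 1).foldl
    (fun acc n =>
      if PySem.List.pyGetD outcomes n 0 == 1 then acc ++ [-bid_difference] else acc ++ [0]) []
  (payments, bid_difference)

-- ===== PORT B =====
-- one step of B's linear scan: state = (highest so far, second-highest distinct so far)
def bdtsStep (p : Option Int × Option Int) (a : Int) : Option Int × Option Int :=
  match p with
  | (none, _) => (some a, none)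
  | (some h, lo) =>
    if h < a then (some a, some h)
    else if a ≠ h then
      match lo with
      | none => (some h, some a)
      | some l => if l < a then (some h, some a) else (some h, some l)
    else (some h, lo)

def bid_difference_to_society_alt (actions : List Int) (outcomes : List Int) : List Int × Int :=
  let st := actions.foldl bdtsStep (none, none)
  let diff := st.1.getD 0 - st.2.getD 0
  ((List.range actions.length).map
      (fun n => if PySem.List.pyGetD outcomes (n : Int) 0 == 1 then -diff else 0),
   diff)

-- ===== PRECONDITION & SPEC =====
-- A raises on these excluded inputs: max() on empty actions (ValueError), sorted(set)[-2]
-- with fewer than two distinct bids (IndexError), and outcomes shorter than actions (IndexError).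
def Pre_bid_difference_to_society (actions : List Int) (outcomes : List Int) : Prop :=
  (∃ x ∈ actions, ∃ y ∈ actions, x ≠ y) ∧ actions.length ≤ outcomes.length

instance (actions : List Int) (outcomes : List Int) : Decidable (Pre_bid_difference_to_society actions outcomes) := by
  unfold Pre_bid_difference_to_society; infer_instance

def pvWitness_bid_difference_to_society : List Int × List Int := ([1, 2], [1, 0])

def Spec_bid_difference_to_society (actions : List Int) (outcomes : List Int) (out : List Int × Int) : Prop := out = bid_difference_to_society_alt actions outcomes
instance (actions : List Int) (outcomes : List Int) (out : List Int × Int) : Decidable (Spec_bid_difference_to_society actions outcomes out) := by unfold Spec_bid_difference_to_society; infer_instance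

-- ===== CLAIM (what is proved, stated in full; the proofs are below) =====
def Claim_equal_bid_difference_to_society : Prop := ∀ (actions : List Int) (outcomes : List Int), Dom_bid_difference_to_society actions outcomes → Pre_bid_difference_to_society actions outcomes → Spec_bid_difference_to_society actions outcomes (bid_difference_to_society actions outcomes)

-- ===== LEMMAS AND PROOFS =====

-- characterisation of B's scan: first component is the maximum, second is the
-- greatest element strictly below it (none iff all elements equal the maximum)
theorem bdts_fold_char (p : List Int) (hp : p ≠ []) :
    ∃ M Lo, p.foldl bdtsStep (none, none) = (some M, Lo) ∧ M ∈ p ∧ (∀ y ∈ p, y ≤ M) ∧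
      (Lo = none → ∀ y ∈ p, y = M) ∧
      (∀ S, Lo = some S → S ∈ p ∧ S < M ∧ ∀ y ∈ p, y < M → y ≤ S) := by
  induction p using List.reverseRecOn with
  | nil => exact absurd rfl hp
  | append_singleton q a ih =>
    rcases eq_or_ne q [] with hq | hq
    · subst hq
      refine ⟨a, none, ?_, by simp, by simp, by simp, by simp⟩
      simp [bdtsStep]
    · obtain ⟨M, Lo, hfold, hmem, hub, hnone, hsome⟩ := ih hq
      rw [List.foldl_append, hfold]
      simp only [List.foldl_cons, List.foldl_nil]
      by_cases hMa : M < a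
      · refine ⟨a, some M, ?_, by simp, ?_, by simp, ?_⟩
        · simp [bdtsStep, hMa]
        · intro y hy
          rcases List.mem_append.1 hy with h | h
          · exact le_of_lt (lt_of_le_of_lt (hub y h) hMa)
          · simp at h; omega
        · intro S hS
          injection hS with hS; subst hS
          refine ⟨by simp [hmem], hMa, ?_⟩
          intro y hy hyl
          rcases List.mem_append.1 hy with h | h
          · exact hub y h
          · simp at h; omega
      · by_cases haM : a = M
        · refine ⟨M, Lo, ?_, by simp [hmem], ?_, ?_, ?_⟩
          · simp [bdtsStep, haM]
          · intro y hy
            rcases List.mem_append.1 hy with h | h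
            · exact hub y h
            · simp at h; omega
          · intro h y hy
            rcases List.mem_append.1 hy with h' | h'
            · exact hnone h y h'
            · simp at h'; omega
          · intro S hS
            obtain ⟨h1, h2, h3⟩ := hsome S hS
            refine ⟨by simp [h1], h2, ?_⟩
            intro y hy hyl
            rcases List.mem_append.1 hy with h' | h'
            · exact h3 y h' hyl
            · simp at h'; omega
        · have haM' : a < M := lt_of_le_of_ne (not_lt.1 hMa) haM
          cases Lo with
          | none =>
            refine ⟨M, some a, ?_, by simp [hmem], ?_, by simp, ?_⟩
            · simp [bdtsStep, hMa, haM]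
            · intro y hy
              rcases List.mem_append.1 hy with h | h
              · exact hub y h
              · simp at h; omega
            · intro S hS
              injection hS with hS; subst hS
              refine ⟨by simp, haM', ?_⟩
              intro y hy hyl
              rcases List.mem_append.1 hy with h | h
              · have := hnone rfl y h; omega
              · simp at h; omega
          | some l =>
            obtain ⟨hl1, hl2, hl3⟩ := hsome l rfl
            by_cases hla : l < a
            · refine ⟨M, some a, ?_, by simp [hmem], ?_, by simp, ?_⟩
              · simp [bdtsStep, hMa, haM, hla]
              · intro y hy
                rcases List.mem_append.1 hy with h | h
                · exact hub y h
                · simp at h; omega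
              · intro S hS
                injection hS with hS; subst hS
                refine ⟨by simp, haM', ?_⟩
                intro y hy hyl
                rcases List.mem_append.1 hy with h | h
                · have := hl3 y h hyl; omega
                · simp at h; omega
            · refine ⟨M, some l, ?_, by simp [hmem], ?_, by simp, ?_⟩
              · simp [bdtsStep, hMa, haM, hla]
              · intro y hy
                rcases List.mem_append.1 hy with h | h
                · exact hub y h
                · simp at h; omega
              · intro S hS
                injection hS with hS; subst hS
                refine ⟨by simp [hl1], hl2, ?_⟩
                intro y hy hyl
                rcases List.mem_append.1 hy with h | h
                · exact hl3 y h hyl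
                · simp at h; omega

-- two distinct members force length ≥ 2
theorem two_le_length_of_two_mem {l : List Int} {x y : Int} (hx : x ∈ l) (hy : y ∈ l)
    (hxy : x ≠ y) : 2 ≤ l.length := by
  match l with
  | [] => simp at hx
  | [c] => simp at hx hy; omega
  | a :: b :: t => simp

-- ===== VERDICT (by name: the statement is the Claim_ definition above) =====
theorem bid_difference_to_society_spec : Claim_equal_bid_difference_to_society := by
  intro actions outcomes _ hpre
  obtain ⟨⟨x, hx, y, hy, hxy⟩, hlen⟩ := hpre
  unfold Spec_bid_difference_to_society
  have hne : actions ≠ [] := by intro h; rw [h] at hx; simp at hx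
  obtain ⟨M, Lo, hfold, hMmem, hub, hnone, hsome⟩ := bdts_fold_char actions hne
  -- some element of actions lies strictly below the maximum M
  obtain ⟨z, hz, hzM⟩ : ∃ z ∈ actions, z < M := by
    by_cases hxM : x = M
    · exact ⟨y, hy, lt_of_le_of_ne (hub y hy) (by omega)⟩
    · exact ⟨x, hx, lt_of_le_of_ne (hub x hx) hxM⟩
  -- hence B's scan ends with Lo = some S, the second-highest distinct bid
  obtain ⟨S, rfl⟩ : ∃ S, Lo = some S := by
    cases hLo : Lo with
    | none => have := hnone hLo z hz; omega
    | some S => exact ⟨S, rfl⟩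
  obtain ⟨hSmem, hSlt, hSub⟩ := hsome S rfl
  -- A's max(actions) is M
  have hmax : (PySem.List.max? actions (fun x => x)).getD 0 = M := by
    cases hm : PySem.List.max? actions (fun x => x) with
    | none => rw [PySem.List.max?_eq_none_iff] at hm; exact absurd hm hne
    | some m =>
      have h1 : m ≤ M := hub m (PySem.List.max?_mem hm)
      have h2 : M ≤ m := PySem.List.max?_isMax hm M hMmem
      simp; omega
  -- A's sorted(set(actions))[-2] is S
  have hsec : (PySem.List.pyGet? (PySem.List.sorted (PySem.Set.ofList actions) (fun x => x) false) (-2)).getD 0 = S := by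
    have hpair := PySem.List.sorted_ofList_pairwise_lt (xs := actions)
    have hmemt : ∀ w : Int, w ∈ PySem.List.sorted (PySem.Set.ofList actions) (fun x => x) false ↔ w ∈ actions := by
      intro w; rw [PySem.List.mem_sorted, PySem.Set.mem_ofList]
    have hget := List.pairwise_iff_getElem.1 hpair
    have hlen2 : 2 ≤ (PySem.List.sorted (PySem.Set.ofList actions) (fun x => x) false).length :=
      two_le_length_of_two_mem ((hmemt z).2 hz) ((hmemt M).2 hMmem) (by omega)
    rw [PySem.List.pyGet?_neg_ofNat _ 2 (by omega) hlen2]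
    set t := PySem.List.sorted (PySem.Set.ofList actions) (fun x => x) false with ht
    rw [List.getElem?_eq_getElem (by omega)]
    -- the last element of t is M
    have hlast : t[t.length - 1]'(by omega) = M := by
      have h1 : t[t.length - 1]'(by omega) ≤ M := hub _ ((hmemt _).1 (List.getElem_mem _))
      obtain ⟨j, hj, hjM⟩ := List.mem_iff_getElem.1 ((hmemt M).2 hMmem)
      rcases eq_or_lt_of_le (Nat.le_sub_one_of_lt hj) with hje | hjl
      · simp only [hje] at hjM; exact hjM
      · have := hget j (t.length - 1) (by omega) (by omega) hjl
        omega
    -- t[len-2] < M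
    have hTlt : t[t.length - 2]'(by omega) < M := by
      have := hget (t.length - 2) (t.length - 1) (by omega) (by omega) (by omega)
      omega
    have hT1 : t[t.length - 2]'(by omega) ≤ S :=
      hSub _ ((hmemt _).1 (List.getElem_mem _)) hTlt
    have hT2 : S ≤ t[t.length - 2]'(by omega) := by
      obtain ⟨i, hi, hiS⟩ := List.mem_iff_getElem.1 ((hmemt S).2 hSmem)
      rcases eq_or_lt_of_le (Nat.le_sub_one_of_lt hi) with hie | hil
      · simp only [hie] at hiS; omega
      · rcases eq_or_lt_of_le (Nat.le_sub_one_of_lt (by omega : i < t.length - 1)) with hie2 | hil2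
        · have hie3 : i = t.length - 2 := by omega
          simp only [hie3] at hiS; omega
        · have := hget i (t.length - 2) (by omega) (by omega) (by omega)
          omega
    simp; omega
  -- assemble
  unfold bid_difference_to_society bid_difference_to_society_alt
  simp only [hfold, hmax, hsec, Option.getD_some]
  refine congrArg₂ Prod.mk ?_ rfl
  have hstep : (fun (acc : List Int) (n : Int) =>
      if PySem.List.pyGetD outcomes n 0 == 1 then acc ++ [-(M - S)] else acc ++ [0]) =
      (fun acc n => acc ++ [if PySem.List.pyGetD outcomes n 0 == 1 then -(M - S) else 0]) := by
    funext acc n; split <;> rfl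
  rw [hstep, PySem.List.foldl_append_singleton_eq_map, PySem.List.pyRange_one]
  simp [List.map_map, Function.comp_def]
  rw [List.map_flatMap]
  simp only [List.map_cons, List.map_nil]
  rw [← List.map_eq_flatMap]
  simp [List.getD_eq_getElem?_getD]
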